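-- pv_equiv track=rewrite | github.com/ldwoooo/SWEA | 20230328_완전검색_그리디_2/5203_베이비진게임.py | run_check
-- ===== SOURCE A (Python) =====
-- def run_check(arr):
--     cnt = 0
--     for k in arr:
--         if cnt == 3:
--             return True
--         if k:                                   # 카드가 있으면 cnt ++ 해주고 연속된 3개이면 참을 반환
--             cnt += 1
--         else:
--             cnt = 0
--
--     if cnt == 3:                                # 1번이 마지막 카드 3장이 7, 8, 9일 때 참을 보내주기 위한 코드
--         return True                             # 마지막이 9이면 return 을 거치지 못하고 for 문이 끝나기 때문
--     return False
-- ===== SOURCE B (Python) =====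
-- def run_check(arr):
--     # sliding window: some window of 3 consecutive entries is all nonzero
--     return any(arr[i] and arr[i + 1] and arr[i + 2] for i in range(len(arr) - 2))
-- ===== Notes on version B (the rewrite author's own statement) =====
-- stated objective: idiomatic
-- what changed: B drops A's running streak counter with early returns and instead checks every length-3 sliding window with a single any() over indices.
import Mathlib
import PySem

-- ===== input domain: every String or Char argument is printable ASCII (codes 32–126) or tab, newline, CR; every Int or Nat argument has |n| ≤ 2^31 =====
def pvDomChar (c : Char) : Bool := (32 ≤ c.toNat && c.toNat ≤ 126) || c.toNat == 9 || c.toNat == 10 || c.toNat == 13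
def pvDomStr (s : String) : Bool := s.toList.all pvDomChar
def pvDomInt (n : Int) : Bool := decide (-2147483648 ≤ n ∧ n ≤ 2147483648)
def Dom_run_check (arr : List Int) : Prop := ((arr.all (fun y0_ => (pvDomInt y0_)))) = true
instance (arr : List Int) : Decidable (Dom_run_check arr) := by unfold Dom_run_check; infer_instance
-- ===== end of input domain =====

-- B replaces A's running streak counter with an any() over all length-3 sliding windows (idiomatic; same cost).

-- ===== PORT A =====
-- the for-loop with early 'return True' and the running counter cnt, transcribed as structural recursion
def runCheckLoop (l : List Int) (cnt : Nat) : Bool :=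
  match l with
  | [] => cnt == 3
  | k :: ks =>
    if cnt == 3 then true
    else if k ≠ 0 then runCheckLoop ks (cnt + 1)
    else runCheckLoop ks 0

def run_check (arr : List Int) : Bool := runCheckLoop arr 0

-- ===== PORT B =====
-- any(arr[i] and arr[i+1] and arr[i+2] for i in range(len(arr)-2)); indices are always in range,
-- Nat subtraction matches Python's empty range for len(arr) < 2
def run_check_alt (arr : List Int) : Bool :=
  (List.range (arr.length - 2)).any fun i =>
    (arr.getD i 0 != 0) && (arr.getD (i + 1) 0 != 0) && (arr.getD (i + 2) 0 != 0)

-- ===== PRECONDITION & SPEC =====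
def Spec_run_check (arr : List Int) (out : Bool) : Prop := out = run_check_alt arr
instance (arr : List Int) (out : Bool) : Decidable (Spec_run_check arr out) := by unfold Spec_run_check; infer_instance

-- ===== CLAIM (what is proved, stated in full; the proofs are below) =====
def Claim_equal_run_check : Prop := ∀ (arr : List Int), Dom_run_check arr → Spec_run_check arr (run_check arr)

-- ===== LEMMAS AND PROOFS =====

-- common spec: some run of >= 3 consecutive nonzero entries, as a window recursion
def hasRun3 : List Int → Bool
  | a :: b :: c :: r => (a != 0 && b != 0 && c != 0) || hasRun3 (b :: c :: r)
  | _ => false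

-- length of the initial nonzero run
def prefixRun : List Int → Nat
  | [] => 0
  | k :: ks => if k ≠ 0 then prefixRun ks + 1 else 0

theorem prefixRun3_iff (a b c : Int) (r : List Int) :
    3 ≤ prefixRun (a :: b :: c :: r) ↔ (a ≠ 0 ∧ b ≠ 0 ∧ c ≠ 0) := by
  simp only [prefixRun]
  split_ifs <;> simp_all <;> omega

theorem hasRun3_cons (a : Int) (l : List Int) :
    hasRun3 (a :: l) = true ↔ 3 ≤ prefixRun (a :: l) ∨ hasRun3 l = true := by
  match l with
  | [] => simp [hasRun3, prefixRun]; split_ifs <;> omega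
  | [b] =>
    simp [hasRun3, prefixRun]
    split_ifs <;> omega
  | b :: c :: r =>
    simp only [hasRun3, Bool.or_eq_true, Bool.and_eq_true, bne_iff_ne, ne_eq,
      prefixRun3_iff]
    tauto

theorem prefixRun_imp (l : List Int) (h : 3 ≤ prefixRun l) : hasRun3 l = true := by
  match l with
  | [] => simp [prefixRun] at h
  | a :: ls => exact (hasRun3_cons a ls).mpr (Or.inl h)

theorem runCheckLoop_iff (l : List Int) (cnt : Nat) (hc : cnt ≤ 3) :
    runCheckLoop l cnt = true ↔ 3 - cnt ≤ prefixRun l ∨ hasRun3 l = true := by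
  induction l generalizing cnt with
  | nil =>
    simp [runCheckLoop, hasRun3, prefixRun]
    omega
  | cons k ks ih =>
    by_cases h3 : cnt = 3
    · subst h3
      rw [show runCheckLoop (k :: ks) 3 = true from rfl]
      constructor
      · intro _; exact Or.inl (by omega)
      · intro _; rfl
    · have hlt : cnt < 3 := by omega
      by_cases hk : k = 0
      · have hL : runCheckLoop (k :: ks) cnt = runCheckLoop ks 0 := by
          simp [runCheckLoop, h3, hk]
        have hpr : prefixRun (k :: ks) = 0 := by simp [prefixRun, hk]
        rw [hL, ih 0 (by omega), hasRun3_cons, hpr]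
        constructor
        · rintro (h | h)
          · exact Or.inr (Or.inr (prefixRun_imp _ (by omega)))
          · exact Or.inr (Or.inr h)
        · rintro (h | h | h)
          · omega
          · omega
          · exact Or.inr h
      · have hL : runCheckLoop (k :: ks) cnt = runCheckLoop ks (cnt + 1) := by
          simp [runCheckLoop, h3, hk]
        have hpr : prefixRun (k :: ks) = prefixRun ks + 1 := by simp [prefixRun, hk]
        rw [hL, ih (cnt + 1) (by omega), hasRun3_cons, hpr]
        constructor
        · rintro (h | h)
          · exact Or.inl (by omega)
          · exact Or.inr (Or.inr h)
        · rintro (h | h | h)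
          · exact Or.inl (by omega)
          · exact Or.inl (by omega)
          · exact Or.inr h

theorem run_check_eq_hasRun3 (arr : List Int) : run_check arr = hasRun3 arr := by
  have h := runCheckLoop_iff arr 0 (by omega)
  show runCheckLoop arr 0 = hasRun3 arr
  cases h0 : runCheckLoop arr 0 <;> cases h1 : hasRun3 arr
  · rfl
  · rw [h0] at h; exact absurd (h.mpr (Or.inr h1)) (by simp)
  · rw [h0] at h
    rcases h.mp rfl with h2 | h2
    · exact absurd (prefixRun_imp _ (by omega)) (by simp [h1])
    · rw [h1] at h2; exact absurd h2 (by simp)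
  · rfl

theorem alt_cons (a : Int) (l : List Int) (hl : 2 ≤ l.length) :
    run_check_alt (a :: l) =
      ((a != 0 && (l.getD 0 0 != 0) && (l.getD 1 0 != 0)) || run_check_alt l) := by
  have hlen : (a :: l).length - 2 = (l.length - 2) + 1 := by
    simp only [List.length_cons]; omega
  simp only [run_check_alt, hlen, List.range_succ_eq_map, List.any_cons, List.any_map]
  simp [Function.comp_def]

theorem alt_eq_hasRun3 (arr : List Int) : run_check_alt arr = hasRun3 arr := by
  match arr with
  | [] => decide
  | [a] => simp [run_check_alt, hasRun3]
  | [a, b] => simp [run_check_alt, hasRun3]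
  | a :: b :: c :: r =>
    rw [alt_cons a (b :: c :: r) (by simp), alt_eq_hasRun3 (b :: c :: r)]
    simp [hasRun3]

-- ===== VERDICT (by name: the statement is the Claim_ definition above) =====
theorem run_check_spec : Claim_equal_run_check := by
  intro arr _
  unfold Spec_run_check
  rw [run_check_eq_hasRun3, alt_eq_hasRun3]
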